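-- pv_equiv track=rewrite | github.com/C-C-github/python | cogn/knight_row_slicemethod.py | slice_method
-- ===== SOURCE A (Python) =====
-- def slice_method(n,knight):
--     spl=0
--     for i in range(n):
--         ls=sum(1 for j in range(i) if knight[j]>knight[i])
--         rs=sum(1 for j in range(i+1,n) if knight[j]>knight[i])
--         if ls>rs:
--             spl+=1
--     return spl
-- ===== SOURCE B (Python) =====
-- def slice_method(n, knight):
--     if n <= 0:
--         return 0
--     d = [0] * n
--     for i in range(n):
--         ki = knight[i]
--         for j in range(i):
--             if knight[j] > ki:
--                 d[i] += 1
--             elif ki > knight[j]: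
--                 d[j] -= 1
--     return sum(1 for x in d if x > 0)
-- ===== Notes on version B (the rewrite author's own statement) =====
-- stated objective: alternative
-- what changed: Instead of two per-index scans (larger-left and larger-right counts recomputed for every i), B makes a single sweep over unordered index pairs (j,i), j<i, accumulating each index's left-minus-right difference in an array, and finally counts the positive entries.
-- outside the precondition, e.g. on slice_method(1, []): A returns 0, B raises IndexError
import Mathlib
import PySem

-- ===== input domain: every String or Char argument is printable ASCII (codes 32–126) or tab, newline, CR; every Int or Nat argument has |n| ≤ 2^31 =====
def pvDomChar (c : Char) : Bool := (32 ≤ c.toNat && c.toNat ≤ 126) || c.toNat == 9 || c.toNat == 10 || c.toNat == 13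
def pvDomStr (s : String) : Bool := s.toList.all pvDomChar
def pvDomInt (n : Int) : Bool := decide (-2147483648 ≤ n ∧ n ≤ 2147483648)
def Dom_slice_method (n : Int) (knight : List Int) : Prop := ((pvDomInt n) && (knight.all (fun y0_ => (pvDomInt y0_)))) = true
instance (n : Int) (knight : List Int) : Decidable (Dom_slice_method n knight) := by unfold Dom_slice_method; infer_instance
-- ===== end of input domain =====

-- B replaces A's two per-index scans by a single pass over index pairs that accumulates the
-- left-minus-right difference per index in an array, then counts positive entries (objective: alternative).

-- ===== PORT A =====
def slice_method (n : Int) (knight : List Int) : Int :=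
  (PySem.List.pyRange 0 n 1).foldl (fun spl i =>
    let ls := ((PySem.List.pyRange 0 i 1).map (fun j =>
      if PySem.List.pyGetD knight j 0 > PySem.List.pyGetD knight i 0 then (1 : Int) else 0)).sum
    let rs := ((PySem.List.pyRange (i + 1) n 1).map (fun j =>
      if PySem.List.pyGetD knight j 0 > PySem.List.pyGetD knight i 0 then (1 : Int) else 0)).sum
    if ls > rs then spl + 1 else spl) 0

-- ===== PORT B =====
-- body of B's inner loop: one pair (j, i), j < i, adjusts the difference array d
def innerStep (knight : List Int) (i : Int) (d : List Int) (j : Int) : List Int :=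
  if PySem.List.pyGetD knight j 0 > PySem.List.pyGetD knight i 0 then
    PySem.List.pySetD d i (PySem.List.pyGetD d i 0 + 1)
  else if PySem.List.pyGetD knight i 0 > PySem.List.pyGetD knight j 0 then
    PySem.List.pySetD d j (PySem.List.pyGetD d j 0 - 1)
  else d

-- body of B's outer loop: processes all pairs (j, i) with j < i
def outerStep (knight : List Int) (d : List Int) (i : Int) : List Int :=
  (PySem.List.pyRange 0 i 1).foldl (innerStep knight i) d

def slice_method_alt (n : Int) (knight : List Int) : Int :=
  if n ≤ 0 then 0
  else
    ((PySem.List.pyRange 0 n 1).foldl (outerStep knight) (List.replicate n.toNat 0)).foldl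
      (fun acc x => if 0 < x then acc + 1 else acc) 0

-- ===== PRECONDITION & SPEC =====
-- Pre_ excludes n > len(knight): there A raises IndexError, except in the vacuous corner
-- n = 1 with knight = [] where A's generators never index and it returns 0 while B's
-- uniform pair loop reads knight[0] and raises.
def Pre_slice_method (n : Int) (knight : List Int) : Prop := n ≤ (knight.length : Int)
instance (n : Int) (knight : List Int) : Decidable (Pre_slice_method n knight) := by
  unfold Pre_slice_method; infer_instance
def pvWitness_slice_method : Int × List Int := (3, [2, 1, 3])
def Spec_slice_method (n : Int) (knight : List Int) (out : Int) : Prop := out = slice_method_alt n knight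
instance (n : Int) (knight : List Int) (out : Int) : Decidable (Spec_slice_method n knight out) := by
  unfold Spec_slice_method; infer_instance

-- ===== CLAIM (what is proved, stated in full; the proofs are below) =====
def Claim_equal_slice_method : Prop := ∀ (n : Int) (knight : List Int), Dom_slice_method n knight → Pre_slice_method n knight → Spec_slice_method n knight (slice_method n knight)

-- ===== LEMMAS AND PROOFS =====

-- shorthand for knight[j] as both ports read it
def kget (knight : List Int) (j : Int) : Int := PySem.List.pyGetD knight j 0

-- ls at index i: count of j < i with knight[j] > knight[i]
def Lcnt (knight : List Int) (i : Int) : Int :=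
  ((PySem.List.pyRange 0 i 1).countP (fun j => decide (kget knight i < kget knight j)) : Int)

-- rs at index i, right edge m: count of i < j < m with knight[j] > knight[i]
def Rcnt (knight : List Int) (m i : Int) : Int :=
  ((PySem.List.pyRange (i + 1) m 1).countP (fun j => decide (kget knight i < kget knight j)) : Int)

lemma length_innerStep (knight : List Int) (i : Int) (d : List Int) (j : Int) :
    (innerStep knight i d j).length = d.length := by
  unfold innerStep
  split_ifs <;> simp [PySem.List.length_pySetD]

lemma length_foldl_innerStep (knight : List Int) (i : Int) (l : List Int) :
    ∀ d : List Int, (l.foldl (innerStep knight i) d).length = d.length := by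
  induction l with
  | nil => intro d; rfl
  | cons x t ih => intro d; simp [List.foldl_cons, ih, length_innerStep]

lemma length_foldl_outerStep (knight : List Int) (l : List Int) :
    ∀ d : List Int, (l.foldl (outerStep knight) d).length = d.length := by
  induction l with
  | nil => intro d; rfl
  | cons x t ih =>
      intro d
      rw [List.foldl_cons, ih, outerStep, length_foldl_innerStep]

lemma pyGetD_pySetD_int (xs : List Int) (p q : Int) (v : Int)
    (hp0 : 0 ≤ p) (hq0 : 0 ≤ q) (hp : p < (xs.length : Int)) :
    PySem.List.pyGetD (PySem.List.pySetD xs p v) q 0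
      = if q = p then v else PySem.List.pyGetD xs q 0 := by
  have h1 : p = ((p.toNat : Nat) : Int) := by omega
  have h2 : q = ((q.toNat : Nat) : Int) := by omega
  rw [h1, h2, PySem.List.pyGetD_pySetD_natCast xs p.toNat q.toNat v 0 (by omega)]
  by_cases h : q.toNat = p.toNat
  · rw [if_pos h, if_pos (by omega : ((q.toNat : Nat) : Int) = ((p.toNat : Nat) : Int))]
  · rw [if_neg h, if_neg (by omega : ¬ ((q.toNat : Nat) : Int) = ((p.toNat : Nat) : Int))]

lemma inner_char (knight : List Int) (i : Int) (hi0 : 0 ≤ i)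
    (d : List Int) (hid : i < (d.length : Int))
    (t : Int) (ht0 : 0 ≤ t) (hti : t ≤ i) :
    ∀ q : Int, 0 ≤ q →
    PySem.List.pyGetD ((PySem.List.pyRange 0 t 1).foldl (innerStep knight i) d) q 0
      = PySem.List.pyGetD d q 0 +
        (if q = i then
          ((PySem.List.pyRange 0 t 1).countP (fun j => decide (kget knight i < kget knight j)) : Int)
        else if q < t ∧ kget knight q < kget knight i then -1 else 0) := by
  induction t, ht0 using Int.le_induction with
  | base =>
      intro q hq0
      rw [PySem.List.pyRange_one_eq_nil (le_refl 0)]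
      have h0 : ¬ (q < 0 ∧ kget knight q < kget knight i) := by rintro ⟨h, _⟩; omega
      simp [h0]
  | succ t ht ih =>
      have hti' : t ≤ i := by omega
      have hitne : t ≠ i := by omega
      have ih := ih hti'
      intro q hq0
      rw [PySem.List.pyRange_one_succ_right ht, List.foldl_append]
      set r := (PySem.List.pyRange 0 t 1).foldl (innerStep knight i) d with hr
      have hrlen : r.length = d.length := length_foldl_innerStep knight i _ d
      have hri : PySem.List.pyGetD r i 0
          = PySem.List.pyGetD d i 0 +
            ((PySem.List.pyRange 0 t 1).countP (fun j => decide (kget knight i < kget knight j)) : Int) := by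
        have h := ih i hi0
        rwa [if_pos rfl] at h
      have hrt : PySem.List.pyGetD r t 0 = PySem.List.pyGetD d t 0 := by
        have h := ih t ht
        have h1 : ¬ (t < t ∧ kget knight t < kget knight i) := by rintro ⟨h', _⟩; omega
        rwa [if_neg hitne, if_neg h1, add_zero] at h
      have hcnt : (((PySem.List.pyRange 0 t 1 ++ [t]).countP
            (fun j => decide (kget knight i < kget knight j)) : Nat) : Int)
          = ((PySem.List.pyRange 0 t 1).countP (fun j => decide (kget knight i < kget knight j)) : Int)
            + (if kget knight i < kget knight t then 1 else 0) := by
        rw [List.countP_append]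
        by_cases hp : kget knight i < kget knight t
        · simp [hp]
        · simp [hp]
      simp only [List.foldl_cons, List.foldl_nil]
      show PySem.List.pyGetD (innerStep knight i r t) q 0 = _
      unfold innerStep
      have hkk : ∀ j : Int, PySem.List.pyGetD knight j 0 = kget knight j := fun _ => rfl
      simp only [hkk]
      by_cases c1 : kget knight i < kget knight t
      · rw [if_pos c1, pyGetD_pySetD_int r i q _ hi0 hq0 (by omega)]
        by_cases hqi : q = i
        · rw [if_pos hqi, if_pos hqi, hri, hcnt, if_pos c1, hqi]; ring
        · rw [if_neg hqi, if_neg hqi, ih q hq0, if_neg hqi]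
          congr 1
          by_cases hqt : q = t
          · have h1 : ¬ (q < t ∧ kget knight q < kget knight i) := by rintro ⟨h', _⟩; omega
            have h2 : ¬ (q < t + 1 ∧ kget knight q < kget knight i) := by
              rintro ⟨_, h'⟩; rw [hqt] at h'; omega
            rw [if_neg h1, if_neg h2]
          · have hiff : (q < t + 1 ∧ kget knight q < kget knight i)
                ↔ (q < t ∧ kget knight q < kget knight i) := by
              constructor <;> rintro ⟨h1, h2⟩ <;> exact ⟨by omega, h2⟩
            rw [if_congr hiff rfl rfl]
      · rw [if_neg c1]
        by_cases c2 : kget knight t < kget knight i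
        · rw [if_pos c2, pyGetD_pySetD_int r t q _ ht hq0 (by omega)]
          by_cases hqt : q = t
          · have hqi : q ≠ i := by omega
            rw [if_pos hqt, if_neg hqi, hrt]
            have h2 : (q < t + 1 ∧ kget knight q < kget knight i) := by
              constructor
              · omega
              · rw [hqt]; exact c2
            rw [if_pos h2, hqt]; ring
          · rw [if_neg hqt, ih q hq0]
            by_cases hqi : q = i
            · rw [if_pos hqi, if_pos hqi, hcnt, if_neg c1]; ring
            · rw [if_neg hqi, if_neg hqi]
              congr 1
              have hiff : (q < t + 1 ∧ kget knight q < kget knight i)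
                  ↔ (q < t ∧ kget knight q < kget knight i) := by
                constructor <;> rintro ⟨h1, h2⟩ <;> exact ⟨by omega, h2⟩
              rw [if_congr hiff rfl rfl]
        · rw [if_neg c2, ih q hq0]
          by_cases hqi : q = i
          · rw [if_pos hqi, if_pos hqi, hcnt, if_neg c1]; ring
          · rw [if_neg hqi, if_neg hqi]
            congr 1
            by_cases hqt : q = t
            · have h1 : ¬ (q < t ∧ kget knight q < kget knight i) := by rintro ⟨h', _⟩; omega
              have h2 : ¬ (q < t + 1 ∧ kget knight q < kget knight i) := by
                rintro ⟨_, h'⟩; rw [hqt] at h'; omega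
              rw [if_neg h1, if_neg h2]
            · have hiff : (q < t + 1 ∧ kget knight q < kget knight i)
                  ↔ (q < t ∧ kget knight q < kget knight i) := by
                constructor <;> rintro ⟨h1, h2⟩ <;> exact ⟨by omega, h2⟩
              rw [if_congr hiff rfl rfl]

lemma outer_char (knight : List Int) (n : Int) (q : Int) (hq0 : 0 ≤ q) (hqn : q < n)
    (m : Int) (h0 : 0 ≤ m) (hmn : m ≤ n) :
    PySem.List.pyGetD ((PySem.List.pyRange 0 m 1).foldl (outerStep knight) (List.replicate n.toNat 0)) q 0
      = if q < m then Lcnt knight q - Rcnt knight m q else 0 := by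
  induction m, h0 using Int.le_induction with
  | base =>
      rw [PySem.List.pyRange_one_eq_nil (le_refl 0)]
      have : ¬ q < 0 := by omega
      simp only [List.foldl_nil, this, if_false]
      rw [PySem.List.pyGetD_of_nonneg _ _ hq0, List.getD_replicate]
      omega
  | succ m hm ih =>
      have hmn' : m ≤ n := by omega
      have ih := ih hmn'
      rw [PySem.List.pyRange_one_succ_right hm, List.foldl_append]
      set r := (PySem.List.pyRange 0 m 1).foldl (outerStep knight) (List.replicate n.toNat 0) with hrdef
      have hrlen : r.length = n.toNat := by
        rw [hrdef, length_foldl_outerStep]; simp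
      simp only [List.foldl_cons, List.foldl_nil]
      show PySem.List.pyGetD (outerStep knight r m) q 0 = _
      rw [outerStep]
      rw [inner_char knight m hm r (by omega) m hm (le_refl m) q hq0]
      by_cases hqm : q = m
      · subst hqm
        have h1 : ¬ q < q := by omega
        rw [ih, if_neg h1, if_pos rfl, if_pos (by omega : q < q + 1)]
        have : Rcnt knight (q + 1) q = 0 := by
          unfold Rcnt
          rw [PySem.List.pyRange_one_eq_nil (le_refl (q + 1))]
          simp
        rw [this]
        unfold Lcnt
        omega
      · rw [if_neg hqm, ih]
        by_cases hlt : q < m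
        · rw [if_pos hlt, if_pos (by omega : q < m + 1)]
          have hR : Rcnt knight (m + 1) q
              = Rcnt knight m q + (if kget knight q < kget knight m then 1 else 0) := by
            unfold Rcnt
            rw [PySem.List.pyRange_one_succ_right (by omega : q + 1 ≤ m), List.countP_append]
            by_cases hk : kget knight q < kget knight m
            · simp [hk]
            · simp [hk]
          rw [hR]
          by_cases hk : kget knight q < kget knight m
          · rw [if_pos ⟨hlt, hk⟩, if_pos hk]; ring
          · rw [if_neg (by rintro ⟨_, h⟩; exact hk h), if_neg hk]; ring
        · have h1 : ¬ (q < m ∧ kget knight q < kget knight m) := by rintro ⟨h, _⟩; omega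
          have h2 : ¬ q < m + 1 := by omega
          rw [if_neg h1, if_neg hlt, if_neg h2]
          ring

lemma A_eq_count (n : Int) (knight : List Int) :
    slice_method n knight
      = ((PySem.List.pyRange 0 n 1).countP
          (fun i => decide (Rcnt knight n i < Lcnt knight i)) : Int) := by
  unfold slice_method
  have hstep : ∀ (spl i : Int),
      (let ls := ((PySem.List.pyRange 0 i 1).map (fun j =>
          if PySem.List.pyGetD knight j 0 > PySem.List.pyGetD knight i 0 then (1 : Int) else 0)).sum
        let rs := ((PySem.List.pyRange (i + 1) n 1).map (fun j =>
          if PySem.List.pyGetD knight j 0 > PySem.List.pyGetD knight i 0 then (1 : Int) else 0)).sum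
        if ls > rs then spl + 1 else spl)
      = if decide (Rcnt knight n i < Lcnt knight i) then spl + 1 else spl := by
    intro spl i
    have hls : ((PySem.List.pyRange 0 i 1).map (fun j =>
        if PySem.List.pyGetD knight j 0 > PySem.List.pyGetD knight i 0 then (1 : Int) else 0)).sum
        = Lcnt knight i := by
      unfold Lcnt kget
      simpa using PySem.List.sum_map_ite_one_zero
        (fun j => decide (PySem.List.pyGetD knight i 0 < PySem.List.pyGetD knight j 0))
        (PySem.List.pyRange 0 i 1)
    have hrs : ((PySem.List.pyRange (i + 1) n 1).map (fun j =>
        if PySem.List.pyGetD knight j 0 > PySem.List.pyGetD knight i 0 then (1 : Int) else 0)).sum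
        = Rcnt knight n i := by
      unfold Rcnt kget
      simpa using PySem.List.sum_map_ite_one_zero
        (fun j => decide (PySem.List.pyGetD knight i 0 < PySem.List.pyGetD knight j 0))
        (PySem.List.pyRange (i + 1) n 1)
    simp only [hls, hrs]
    by_cases h : Rcnt knight n i < Lcnt knight i
    · rw [if_pos h, if_pos (by simpa using h)]
    · rw [if_neg h, if_neg (by simpa using h)]
  calc (PySem.List.pyRange 0 n 1).foldl (fun spl i =>
        let ls := ((PySem.List.pyRange 0 i 1).map (fun j =>
          if PySem.List.pyGetD knight j 0 > PySem.List.pyGetD knight i 0 then (1 : Int) else 0)).sum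
        let rs := ((PySem.List.pyRange (i + 1) n 1).map (fun j =>
          if PySem.List.pyGetD knight j 0 > PySem.List.pyGetD knight i 0 then (1 : Int) else 0)).sum
        if ls > rs then spl + 1 else spl) 0
      = (PySem.List.pyRange 0 n 1).foldl (fun spl i =>
          if decide (Rcnt knight n i < Lcnt knight i) then spl + 1 else spl) 0 := by
        apply PySem.List.foldl_congr_mem
        intro a b _
        exact hstep a b
    _ = 0 + ((PySem.List.pyRange 0 n 1).countP
          (fun i => decide (Rcnt knight n i < Lcnt knight i)) : Int) :=
        PySem.List.foldl_if_add_one _ _ _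
    _ = _ := by ring

lemma B_eq_count (n : Int) (knight : List Int) (hn : 0 < n) :
    slice_method_alt n knight
      = ((PySem.List.pyRange 0 n 1).countP
          (fun i => decide (Rcnt knight n i < Lcnt knight i)) : Int) := by
  rw [slice_method_alt, if_neg (by omega : ¬ n ≤ 0)]
  set d := (PySem.List.pyRange 0 n 1).foldl (outerStep knight) (List.replicate n.toNat 0) with hd
  have hdlen : d.length = n.toNat := by rw [hd, length_foldl_outerStep]; simp
  have hdlen' : (d.length : Int) = n := by omega
  have hcount := PySem.List.foldl_if_add_one (fun x : Int => decide (0 < x)) d 0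
  simp only [decide_eq_true_eq] at hcount
  rw [hcount]
  have hback : d = (PySem.List.pyRange 0 n 1).map (fun j => PySem.List.pyGetD d j 0) := by
    conv_lhs => rw [← PySem.List.map_pyGetD_pyRange_zero' d 0]
    rw [hdlen']
  have : d.countP (fun x => decide (0 < x))
      = (PySem.List.pyRange 0 n 1).countP
          (fun i => decide (Rcnt knight n i < Lcnt knight i)) := by
    conv_lhs => rw [hback]
    rw [List.countP_map]
    apply List.countP_congr
    intro q hq
    rw [PySem.List.mem_pyRange_one] at hq
    have hval : PySem.List.pyGetD d q 0 = Lcnt knight q - Rcnt knight n q := by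
      rw [hd, outer_char knight n q hq.1 hq.2 n (by omega) (le_refl n), if_pos hq.2]
    simp only [Function.comp, hval]
    constructor
    · intro h; simp at h ⊢; omega
    · intro h; simp at h ⊢; omega
  rw [this]
  ring

-- ===== VERDICT (by name: the statement is the Claim_ definition above) =====
theorem slice_method_spec : Claim_equal_slice_method := by
  intro n knight _ _
  unfold Spec_slice_method
  by_cases hn : 0 < n
  · rw [A_eq_count, B_eq_count n knight hn]
  · have hle : n ≤ 0 := by omega
    unfold slice_method slice_method_alt
    rw [PySem.List.pyRange_one_eq_nil hle, if_pos hle]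
    exact rfl
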